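-- pv_equiv track=rewrite | github.com/PaddiSense/PaddiSense | PaddiSense/Python/ipm_inventory.py | slugify_id
-- ===== SOURCE A (Python) =====
-- from typing import Any, Dict, List, Optional
--
-- def slugify_id(raw_id: str, name: str) -> str:
--     base = (raw_id or "").strip() or (name or "").strip() or "UNKNOWN_PRODUCT"
--     out: List[str] = []
--     for ch in base.upper():
--         if ch.isalnum():
--             out.append(ch)
--         elif ch in (" ", "-", "/"):
--             out.append("_")
--     slug = "".join(out).strip("_")
--     while "__" in slug:
--         slug = slug.replace("__", "_")
--     return slug or "UNKNOWN_PRODUCT"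
-- ===== SOURCE B (Python) =====
-- def slugify_id(raw_id: str, name: str) -> str:
--     # Single forward pass emitting separators lazily between words: no join-then-
--     # strip, no repeated "__"-collapsing scans.
--     base = (raw_id or "").strip() or (name or "").strip() or "UNKNOWN_PRODUCT"
--     parts = []
--     started = False
--     pending = False
--     for ch in base.upper():
--         if ch.isalnum():
--             if pending and started:
--                 parts.append("_")
--             parts.append(ch)
--             started = True
--             pending = False
--         elif ch in " -/":
--             pending = True
--     return "".join(parts) or "UNKNOWN_PRODUCT"
-- ===== Notes on version B (the rewrite author's own statement) =====
-- stated objective: simpler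
-- what changed: Replaces A's append-everything pipeline (join, strip('_'), repeated while-'__'-replace scans) with a single forward pass that emits an underscore lazily only between words, so no post-processing is needed.
import Mathlib
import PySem

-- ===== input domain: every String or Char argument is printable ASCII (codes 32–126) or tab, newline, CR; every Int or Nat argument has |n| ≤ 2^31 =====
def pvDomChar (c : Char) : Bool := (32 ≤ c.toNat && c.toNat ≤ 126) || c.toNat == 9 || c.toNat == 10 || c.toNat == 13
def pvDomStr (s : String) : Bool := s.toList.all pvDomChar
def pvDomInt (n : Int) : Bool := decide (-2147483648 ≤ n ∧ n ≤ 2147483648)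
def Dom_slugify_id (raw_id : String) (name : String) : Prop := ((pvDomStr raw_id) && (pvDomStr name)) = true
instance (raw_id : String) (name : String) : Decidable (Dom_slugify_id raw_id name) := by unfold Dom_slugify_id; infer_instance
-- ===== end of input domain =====

-- B replaces A's append-everything pipeline (join / strip('_') / repeated "__"-replace scans)
-- with one forward pass that emits '_' lazily between words; objective: simpler.

-- ===== PORT A =====
-- A's 'while "__" in slug: slug = slug.replace("__", "_")'; the fuel argument only
-- makes the loop total (each replace shortens the string, so s.length steps suffice —
-- proved below in collapseA_eq_squeeze)
def collapseA : Nat → List Char → List Char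
  | 0, s => s
  | fuel + 1, s =>
    if PySem.Chars.isIn ['_', '_'] s = true then
      collapseA fuel (PySem.Chars.replace s ['_', '_'] ['_'])
    else s

-- the body of A's for-loop (out.append(ch) / out.append("_") / drop)
def stepA (acc : List Char) (ch : Char) : List Char :=
  if PySem.Chars.isalnum ch then acc ++ [ch]
  else if ch = ' ' ∨ ch = '-' ∨ ch = '/' then acc ++ ['_']
  else acc

def slugify_id (raw_id : String) (name : String) : String :=
  -- base = (raw_id or "").strip() or (name or "").strip() or "UNKNOWN_PRODUCT"
  let t1 := PySem.Chars.strip (if raw_id.toList.isEmpty then [] else raw_id.toList)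
  let base :=
    if t1.isEmpty then
      let t2 := PySem.Chars.strip (if name.toList.isEmpty then [] else name.toList)
      if t2.isEmpty then "UNKNOWN_PRODUCT".toList else t2
    else t1
  let out := (PySem.Chars.upper base).foldl stepA []
  -- "".join(out) of one-char strings is the char list `out` itself
  let pre := PySem.Chars.stripChars out ['_']
  let slug := collapseA pre.length pre
  if slug.isEmpty then "UNKNOWN_PRODUCT" else String.ofList slug

-- ===== PORT B =====
-- state (parts, started, pending); the body of B's for-loop
def stepB (st : List Char × Bool × Bool) (ch : Char) : List Char × Bool × Bool :=
  if PySem.Chars.isalnum ch then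
    ((if st.2.2 && st.2.1 then st.1 ++ ['_', ch] else st.1 ++ [ch]), true, false)
  else if ch = ' ' ∨ ch = '-' ∨ ch = '/' then (st.1, st.2.1, true)
  else st

def slugify_id_alt (raw_id : String) (name : String) : String :=
  let t1 := PySem.Chars.strip (if raw_id.toList.isEmpty then [] else raw_id.toList)
  let base :=
    if t1.isEmpty then
      let t2 := PySem.Chars.strip (if name.toList.isEmpty then [] else name.toList)
      if t2.isEmpty then "UNKNOWN_PRODUCT".toList else t2
    else t1
  let st := (PySem.Chars.upper base).foldl stepB ([], false, false)
  if st.1.isEmpty then "UNKNOWN_PRODUCT" else String.ofList st.1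

-- ===== PRECONDITION & SPEC =====
def Spec_slugify_id (raw_id : String) (name : String) (out : String) : Prop := out = slugify_id_alt raw_id name
instance (raw_id : String) (name : String) (out : String) : Decidable (Spec_slugify_id raw_id name out) := by unfold Spec_slugify_id; infer_instance

-- ===== CLAIM (what is proved, stated in full; the proofs are below) =====
def Claim_equal_slugify_id : Prop := ∀ (raw_id : String) (name : String), Dom_slugify_id raw_id name → Spec_slugify_id raw_id name (slugify_id raw_id name)

-- ===== LEMMAS AND PROOFS =====

-- spec of str.replace(s, "__", "_"), needed only to justify termination of A's while-loop
def replUU : List Char → List Char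
  | '_' :: '_' :: r => '_' :: replUU r
  | c :: r => c :: replUU r
  | [] => []

theorem replUU_uu (r : List Char) : replUU ('_' :: '_' :: r) = '_' :: replUU r := by
  simp [replUU]

theorem replUU_cons (a : Char) (x : List Char) (h : ¬(a = '_' ∧ x.head? = some '_')) :
    replUU (a :: x) = a :: replUU x := by
  rw [replUU.eq_def]
  match x with
  | [] => simp
  | d :: t => cases a; cases d; simp_all [List.head?]

theorem replUU_go_eq (fuel : Nat) : ∀ (l acc : List Char), l.length ≤ fuel →
    PySem.Chars.replace.go ['_', '_'] ['_'] fuel l acc = acc.reverse ++ replUU l := by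
  induction fuel with
  | zero =>
    intro l acc h
    have : l = [] := by cases l <;> simp_all
    subst this
    rw [PySem.Chars.replace.go]
    simp [replUU]
  | succ n ih =>
    intro l acc h
    rcases l with _ | ⟨c, t⟩
    · rw [PySem.Chars.replace.go]; simp [replUU]; omega
    · rw [PySem.Chars.replace.go]
      by_cases hp : List.isPrefixOf ['_', '_'] (c :: t)
      · rw [if_pos hp]
        have hpre := List.isPrefixOf_iff_prefix.mp hp
        rcases t with _ | ⟨d, t'⟩
        · simp [List.cons_prefix_cons] at hpre
        · rw [List.cons_prefix_cons] at hpre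
          obtain ⟨rfl, hpre⟩ := hpre
          rw [List.cons_prefix_cons] at hpre
          obtain ⟨rfl, -⟩ := hpre
          have hlen : t'.length ≤ n := by simp at h; omega
          simp only [List.length_cons, List.length_nil, List.drop_succ_cons, List.drop_zero]
          rw [ih _ _ hlen]
          simp [replUU]
      · rw [if_neg hp]
        have hlen : t.length ≤ n := by simp at h; omega
        rw [ih _ _ hlen]
        have hg : ¬(c = '_' ∧ t.head? = some '_') := by
          rintro ⟨rfl, hh⟩
          rcases t with _ | ⟨d, t'⟩
          · simp at hh
          · simp at hh; subst hh
            exact hp (by simp)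
        rw [replUU_cons c t hg]
        simp

theorem replace_eq_replUU (s : List Char) :
    PySem.Chars.replace s ['_', '_'] ['_'] = replUU s := by
  rw [PySem.Chars.replace]
  simp only [List.isEmpty_cons, if_false, Bool.false_eq_true]
  exact (replUU_go_eq s.length s [] le_rfl).trans (by simp)

theorem replUU_length_le (s : List Char) : (replUU s).length ≤ s.length := by
  fun_induction replUU s with
  | case1 r ih => simp; omega
  | case2 c r hguard ih => simp; omega
  | case3 => simp

theorem replUU_length_lt : ∀ {s : List Char}, ['_', '_'] <:+: s → (replUU s).length < s.length := by
  intro s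
  fun_induction replUU s with
  | case1 r ih =>
    intro _
    have := replUU_length_le r; simp; omega
  | case2 c r hguard ih =>
    intro hin
    rcases List.infix_cons_iff.mp hin with hpre | hinf
    · exfalso
      rcases r with _ | ⟨d, t⟩
      · simp [List.cons_prefix_cons] at hpre
      · rw [List.cons_prefix_cons] at hpre
        obtain ⟨h1, hpre⟩ := hpre
        rw [List.cons_prefix_cons] at hpre
        exact hguard t h1.symm (by rw [← hpre.1])
    · have := ih hinf; simp; omega
  | case3 => intro hin; simp at hin

-- cited by collapseA's decreasing_by: Python's replace shortens the string while "__" occurs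
theorem replace_uu_len_lt {s : List Char} (h : PySem.Chars.isIn ['_', '_'] s = true) :
    (PySem.Chars.replace s ['_', '_'] ['_']).length < s.length := by
  rw [replace_eq_replUU]
  exact replUU_length_lt ((PySem.Chars.isIn_iff_infix _ _).mp h)

-- squeeze: collapse every run of '_' to a single '_' (the fixpoint of A's while-loop)
def squeeze : List Char → List Char
  | '_' :: '_' :: r => squeeze ('_' :: r)
  | c :: r => c :: squeeze r
  | [] => []
termination_by s => s.length
decreasing_by all_goals simp

def lstrU (x : List Char) : List Char := x.dropWhile (· == '_')
def rstrU (x : List Char) : List Char := (x.reverse.dropWhile (· == '_')).reverse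

theorem squeeze_uu (r : List Char) : squeeze ('_' :: '_' :: r) = squeeze ('_' :: r) := by
  simp [squeeze]

theorem squeeze_cons (a : Char) (x : List Char) (h : ¬(a = '_' ∧ x.head? = some '_')) :
    squeeze (a :: x) = a :: squeeze x := by
  rw [squeeze.eq_def]
  match x with
  | [] => simp
  | d :: t => cases a; cases d; simp_all [List.head?]

theorem squeeze_cons_of_ne {c : Char} (hc : c ≠ '_') (x : List Char) :
    squeeze (c :: x) = c :: squeeze x := squeeze_cons c x (by simp [hc])

theorem squeeze_append_of_ne {c : Char} (hc : c ≠ '_') (z : List Char) :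
    squeeze (z ++ [c]) = squeeze z ++ [c] := by
  fun_induction squeeze z with
  | case1 r ih => rw [List.cons_append, List.cons_append, squeeze_uu, ← List.cons_append, ih]
  | case2 d r hguard ih =>
    have hs : ¬(d = '_' ∧ (r ++ [c]).head? = some '_') := by
      rcases r with _ | ⟨e, t⟩
      · rintro ⟨rfl, hh⟩; simp at hh; exact hc hh
      · rintro ⟨rfl, hh⟩; simp at hh; exact hguard t rfl (by rw [hh])
    rw [List.cons_append, squeeze_cons d _ hs, ih]; rfl
  | case3 => simp [squeeze]

theorem squeeze_append_underscore (z : List Char) :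
    squeeze (z ++ ['_']) = if z.getLast? = some '_' then squeeze z else squeeze z ++ ['_'] := by
  fun_induction squeeze z with
  | case1 r ih =>
    rw [List.cons_append, List.cons_append, squeeze_uu, ← List.cons_append, ih,
      List.getLast?_cons_cons]
  | case2 d r hguard ih =>
    rcases r with _ | ⟨e, t⟩
    · by_cases hd : d = '_'
      · subst hd; simp [squeeze_uu, squeeze]
      · rw [List.cons_append, List.nil_append, squeeze_cons d _ (fun h => hd h.1),
          squeeze_cons '_' [] (by simp)]
        simp [squeeze, hd]
    · have hde : ¬(d = '_' ∧ ((e :: t) ++ ['_']).head? = some '_') := by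
        rintro ⟨rfl, hh⟩; simp at hh; exact hguard t rfl (by rw [hh])
      rw [List.cons_append, squeeze_cons d _ hde, ih, List.getLast?_cons_cons]
      split <;> rfl
  | case3 => simp [squeeze]

theorem replUU_head (r : List Char) : (replUU r).head? = r.head? := by
  rcases r with _ | ⟨c, t⟩
  · simp [replUU]
  · by_cases hg : c = '_' ∧ t.head? = some '_'
    · obtain ⟨rfl, hh⟩ := hg
      rcases t with _ | ⟨d, t'⟩
      · simp at hh
      · simp at hh; subst hh; rw [replUU_uu]; simp
    · rw [replUU_cons c t hg]; simp

theorem squeeze_cons_underscore (x : List Char) :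
    squeeze ('_' :: x) = if x.head? = some '_' then squeeze x else '_' :: squeeze x := by
  split
  · next hh =>
    rcases x with _ | ⟨d, t⟩
    · simp at hh
    · simp at hh; subst hh; exact squeeze_uu t
  · next hh => exact squeeze_cons _ _ (by simp_all)

theorem squeeze_replUU (s : List Char) : squeeze (replUU s) = squeeze s := by
  fun_induction replUU s with
  | case1 r ih =>
    rw [squeeze_uu, squeeze_cons_underscore, squeeze_cons_underscore, replUU_head, ih]
  | case2 c r hguard ih =>
    by_cases hc : c = '_'
    · subst hc
      rw [squeeze_cons_underscore, squeeze_cons_underscore, replUU_head, ih]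
    · rw [squeeze_cons_of_ne hc, squeeze_cons_of_ne hc, ih]
  | case3 => rfl

theorem squeeze_of_not_infix : ∀ {s : List Char}, ¬ ['_', '_'] <:+: s → squeeze s = s := by
  intro s
  fun_induction squeeze s with
  | case1 r ih => intro h; exact absurd (List.IsPrefix.isInfix ⟨r, rfl⟩) h
  | case2 c r hguard ih =>
    intro h
    rw [ih (fun hin => h (List.infix_cons hin))]
  | case3 => intro _; rfl

theorem collapseA_eq_squeeze : ∀ (fuel : Nat) (s : List Char), s.length ≤ fuel →
    collapseA fuel s = squeeze s := by
  intro fuel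
  induction fuel with
  | zero =>
    intro s h
    have : s = [] := by cases s <;> simp_all
    subst this
    simp [collapseA, squeeze]
  | succ n ih =>
    intro s h
    rw [collapseA]
    by_cases hin : PySem.Chars.isIn ['_', '_'] s = true
    · rw [if_pos hin,
        ih _ (by
          have := replace_uu_len_lt hin
          omega)]
      rw [replace_eq_replUU, squeeze_replUU]
    · rw [if_neg hin]
      exact (squeeze_of_not_infix (fun h2 => hin ((PySem.Chars.isIn_iff_infix _ _).mpr h2))).symm

theorem isalnum_ne_underscore {c : Char} (h : PySem.Chars.isalnum c = true) : c ≠ '_' := by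
  rintro rfl
  simp [PySem.Chars.isalnum, PySem.Chars.isalpha, PySem.Chars.isdigit,
    PySem.Chars.isupper, PySem.Chars.islower] at h

theorem stripChars_eq (x : List Char) :
    PySem.Chars.stripChars x ['_'] = rstrU (lstrU x) := by
  have hp : (fun c => List.contains ['_'] c) = (fun c : Char => c == '_') := by
    funext c; by_cases h : c = '_' <;> simp [h]
  rw [PySem.Chars.stripChars, hp]; rfl

theorem rstrU_append_of_ne {c : Char} (hc : c ≠ '_') (x : List Char) : rstrU (x ++ [c]) = x ++ [c] := by
  simp [rstrU, hc]

theorem rstrU_append_underscore (x : List Char) : rstrU (x ++ ['_']) = rstrU x := by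
  simp [rstrU]

theorem rstrU_of_getLast? {x : List Char} (h : x.getLast? ≠ some '_') : rstrU x = x := by
  induction x using List.reverseRecOn with
  | nil => rfl
  | append_singleton y c ih =>
    rw [List.getLast?_concat] at h
    exact rstrU_append_of_ne (fun hc => h (by rw [hc])) y

theorem lstrU_getLast? {a : List Char} (h : lstrU a ≠ []) : (lstrU a).getLast? = a.getLast? := by
  obtain ⟨v, hv⟩ := Option.isSome_iff_exists.mp (List.getLast?_isSome.mpr h)
  conv_rhs => rw [← List.takeWhile_append_dropWhile (p := (· == '_')) (l := a)]
  rw [List.getLast?_append]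
  have hv' : (List.dropWhile (· == '_') a).getLast? = some v := hv
  rw [hv']; exact hv

theorem squeeze_rstrU (z : List Char) : squeeze (rstrU z) = rstrU (squeeze z) := by
  induction z using List.reverseRecOn with
  | nil => simp [rstrU, squeeze]
  | append_singleton y c ih =>
    by_cases hc : c = '_'
    · subst hc
      rw [rstrU_append_underscore, ih, squeeze_append_underscore]
      split
      · rfl
      · rw [rstrU_append_underscore]
    · rw [rstrU_append_of_ne hc, squeeze_append_of_ne hc, rstrU_append_of_ne hc (x := squeeze y)]

-- the fold invariant tying A's accumulator to B's state
theorem fold_inv (cs : List Char) :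
    squeeze (lstrU (cs.foldl stepA [])) =
        (cs.foldl stepB ([], false, false)).1 ++
          (if (cs.foldl stepB ([], false, false)).2.1 && (cs.foldl stepB ([], false, false)).2.2 then ['_'] else [])
      ∧ (cs.foldl stepB ([], false, false)).2.1 = !(lstrU (cs.foldl stepA [])).isEmpty
      ∧ (cs.foldl stepB ([], false, false)).2.2 = ((cs.foldl stepA []).getLast? == some '_')
      ∧ (cs.foldl stepB ([], false, false)).1.getLast? ≠ some '_' := by
  induction cs using List.reverseRecOn with
  | nil => refine ⟨by simp [lstrU, squeeze], by simp [lstrU], by simp, by simp⟩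
  | append_singleton cs x ih =>
    obtain ⟨i1, i2, i3, i4⟩ := ih
    rw [List.foldl_concat, List.foldl_concat]
    set a := cs.foldl stepA [] with ha
    set st := cs.foldl stepB ([], false, false) with hst
    by_cases hal : PySem.Chars.isalnum x
    · -- alnum char: both append x, B possibly emits the pending '_' first
      have hx : x ≠ '_' := isalnum_ne_underscore hal
      have hxb : (some x == some '_') = false := by simp [hx]
      rw [stepA, if_pos hal, stepB, if_pos hal]
      have hl : lstrU (a ++ [x]) = if (lstrU a).isEmpty then [x] else lstrU a ++ [x] := by
        rw [lstrU, List.dropWhile_append]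
        simp [lstrU, hx]
      by_cases hz : (lstrU a).isEmpty
      · have hst1 : st.2.1 = false := by simp [i2, hz]
        have hparts : st.1 = [] := by
          have := i1
          rw [List.isEmpty_iff.mp hz] at this
          have h0 : squeeze [] = [] := by simp [squeeze]
          rw [h0] at this
          exact (List.append_eq_nil_iff.mp this.symm).1
        rw [hl, if_pos hz]
        refine ⟨?_, by simp, by simp [hxb], by simp [hst1, hx]⟩
        rw [hst1]
        simp [hparts, squeeze_cons_of_ne hx, squeeze]
      · have hst1 : st.2.1 = true := by simp [i2, hz]
        rw [hl, if_neg hz]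
        have hsq : squeeze (lstrU a ++ [x]) = squeeze (lstrU a) ++ [x] := squeeze_append_of_ne hx _
        refine ⟨?_, by simp, by simp [hxb], ?_⟩
        · rw [hsq, i1, hst1]
          by_cases hp : st.2.2
          · rw [hp]; simp
          · simp at hp; rw [hp]; simp
        · by_cases hp : st.2.2 && st.2.1
          · rw [if_pos hp]
            have : st.1 ++ ['_', x] = (st.1 ++ ['_']) ++ [x] := by simp
            rw [this, List.getLast?_concat]
            simp [hx]
          · rw [if_neg hp, List.getLast?_concat]
            simp [hx]
    · rw [stepA, if_neg hal, stepB, if_neg hal]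
      by_cases hsep : x = ' ' ∨ x = '-' ∨ x = '/'
      · -- separator: A appends '_', B just records it as pending
        rw [if_pos hsep, if_pos hsep]
        have hl : lstrU (a ++ ['_']) = if (lstrU a).isEmpty then [] else lstrU a ++ ['_'] := by
          rw [lstrU, List.dropWhile_append]
          simp [lstrU]
        by_cases hz : (lstrU a).isEmpty
        · have hst1 : st.2.1 = false := by simp [i2, hz]
          have hparts : st.1 = [] := by
            have := i1
            rw [List.isEmpty_iff.mp hz] at this
            have h0 : squeeze [] = [] := by simp [squeeze]
            rw [h0] at this
            exact (List.append_eq_nil_iff.mp this.symm).1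
          rw [hl, if_pos hz]
          exact ⟨by rw [hst1]; simp [hparts, squeeze], by simp [hst1], by simp, i4⟩
        · have hst1 : st.2.1 = true := by simp [i2, hz]
          rw [hl, if_neg hz]
          refine ⟨?_, by simp [hst1], by simp, i4⟩
          rw [squeeze_append_underscore, lstrU_getLast? (fun hh => hz (by rw [hh]; rfl))]
          by_cases hp : a.getLast? = some '_'
          · have h22 : st.2.2 = true := by rw [i3, hp]; simp
            rw [if_pos hp, i1, hst1, h22]
          · have h22 : st.2.2 = false := by rw [i3]; simp [hp]
            rw [if_neg hp, i1, hst1, h22]; simp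
      · rw [if_neg hsep, if_neg hsep]
        exact ⟨i1, i2, i3, i4⟩

theorem main_lemma (cs : List Char) :
    collapseA (PySem.Chars.stripChars (cs.foldl stepA []) ['_']).length
        (PySem.Chars.stripChars (cs.foldl stepA []) ['_']) =
      (cs.foldl stepB ([], false, false)).1 := by
  obtain ⟨i1, i2, i3, i4⟩ := fold_inv cs
  rw [collapseA_eq_squeeze _ _ (by rw [stripChars_eq]), stripChars_eq, squeeze_rstrU, i1]
  split
  · rw [rstrU_append_underscore, rstrU_of_getLast? i4]
  · rw [List.append_nil, rstrU_of_getLast? i4]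

-- ===== VERDICT (by name: the statement is the Claim_ definition above) =====
theorem slugify_id_spec : Claim_equal_slugify_id := by
  intro raw_id name _
  unfold Spec_slugify_id slugify_id slugify_id_alt
  simp only [main_lemma]
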